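-- pv_equiv track=rewrite | github.com/YupengQI99/RC-PINN | KIT/11.py | find_min_bus_routes
-- ===== SOURCE A (Python) =====
-- from collections import defaultdict, deque
--
-- def find_min_bus_routes(start, breakfast, end, routes):
--     # 构建站台到路线的邻接表
--     station_to_routes = defaultdict(set)
--     for i, route in enumerate(routes):
--         for station in route:
--             station_to_routes[station].add(i)
--
--     # 使用广度优先搜索 (BFS)
--     def bfs(start_station, target_station):
--         queue = deque([(start_station, 0)])  # (当前站台, 已乘坐的公交车数量)
--         visited_stations = set([start_station])
--         visited_routes = set()
--
--         while queue:
--             station, bus_count = queue.popleft()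
--
--             # 如果到达目标站台
--             if station == target_station:
--                 return bus_count
--
--             # 遍历经过当前站台的所有路线
--             for route_id in station_to_routes[station]:
--                 if route_id in visited_routes:
--                     continue
--
--                 visited_routes.add(route_id)
--
--                 # 在该路线中，所有站台都可以访问
--                 for next_station in routes[route_id]:
--                     if next_station not in visited_stations:
--                         visited_stations.add(next_station)
--                         queue.append((next_station, bus_count + 1))
--
--         return -1  # 无法到达目标站台
--
--     # 首先找从上车站到早餐站台的最小公交数
--     to_breakfast = bfs(start, breakfast)
--     if to_breakfast == -1:
--         return -1
--
--     # 然后从早餐站台到公司站台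
--     to_end = bfs(breakfast, end)
--     if to_end == -1:
--         return -1
--
--     return to_breakfast + to_end
-- ===== SOURCE B (Python) =====
-- def find_min_bus_routes(start, breakfast, end, routes):
--     # Saturation sweeps: no station->routes index and no queue. Each bus level
--     # re-scans the whole route list against a snapshot of the reached set and
--     # absorbs every unused route that touches it; a route touching previously
--     # reached stations was absorbed in an earlier sweep, so each sweep adds
--     # exactly the stations reachable with one more bus.
--     def min_buses(source, target):
--         if source == target:
--             return 0
--         reached = {source}
--         used = set()
--         buses = 0
--         while True:
--             buses += 1
--             prev = reached
--             reached = set(reached)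
--             for i, route in enumerate(routes):
--                 if i not in used and any(s in prev for s in route):
--                     used.add(i)
--                     reached.update(route)
--             if target in reached:
--                 return buses
--             if len(reached) == len(prev):
--                 return -1
--
--     first = min_buses(start, breakfast)
--     if first == -1:
--         return -1
--     second = min_buses(breakfast, end)
--     return -1 if second == -1 else first + second
-- ===== Notes on version B (the rewrite author's own statement) =====
-- stated objective: alternative
-- what changed: Drops A's station->routes index and BFS queue entirely: B repeatedly sweeps the whole route list against a snapshot of the reached station set, absorbing every unused route that touches it, one sweep per bus, until the target is absorbed or the set stops growing.
import Mathlib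
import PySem

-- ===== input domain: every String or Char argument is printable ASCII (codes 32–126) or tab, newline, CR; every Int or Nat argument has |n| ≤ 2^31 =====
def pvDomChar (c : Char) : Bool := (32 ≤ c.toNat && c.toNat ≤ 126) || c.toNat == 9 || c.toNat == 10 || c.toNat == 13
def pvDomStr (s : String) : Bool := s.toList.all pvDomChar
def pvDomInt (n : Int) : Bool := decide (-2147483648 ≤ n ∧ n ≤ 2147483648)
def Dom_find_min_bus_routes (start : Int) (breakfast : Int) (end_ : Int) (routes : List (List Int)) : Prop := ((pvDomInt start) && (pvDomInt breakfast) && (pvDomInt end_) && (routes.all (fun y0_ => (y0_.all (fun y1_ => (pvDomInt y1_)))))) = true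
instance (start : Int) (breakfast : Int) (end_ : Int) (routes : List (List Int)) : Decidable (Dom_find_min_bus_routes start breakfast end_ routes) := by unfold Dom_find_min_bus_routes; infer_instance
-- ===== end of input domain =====

-- A (indexed station-BFS with a deque and per-entry bus counts) vs B (index-free saturation:
-- one whole-route-list sweep per bus level against a snapshot of the reached set): same value.


-- ===== PORT A =====
-- station_to_routes = defaultdict(set); for i, route in enumerate(routes): for station in route: …[station].add(i)
def pvAdjA (routes : List (List Int)) : PySem.Dict Int (PySem.Set Int) :=
  (PySem.List.enumerate routes 0).foldl
    (fun d p => p.2.foldl (fun d st => d.insert st (PySem.Set.add (d.getD st []) p.1)) d)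
    PySem.Dict.empty

-- how many stations of `routes` are not yet in S (used for the fuel bounds of both ports)
def pvFree (routes : List (List Int)) (S : PySem.Set Int) : Nat :=
  (routes.flatten.dedup.filter (fun x => decide (x ∉ S))).length

-- inner loop of A's bfs: for next_station in routes[route_id]: …

def pvVisitRouteA (routes : List (List Int)) (c : Int)
    (acc : List (Int × Int) × PySem.Set Int) (rid : Int) :
    List (Int × Int) × PySem.Set Int :=
  (PySem.List.pyGetD routes rid []).foldl
    (fun a st2 => if st2 ∈ a.2 then a else (a.1 ++ [(st2, c + 1)], PySem.Set.add a.2 st2)) acc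

-- middle loop of A's bfs: for route_id in station_to_routes[station]: …

def pvStepA (routes : List (List Int)) (adjE : PySem.Set Int) (c : Int)
    (acc : List (Int × Int) × PySem.Set Int × PySem.Set Int) :
    List (Int × Int) × PySem.Set Int × PySem.Set Int :=
  adjE.foldl
    (fun a rid =>
      if rid ∈ a.2.2 then a
      else
        let vr := PySem.Set.add a.2.2 rid
        let r := pvVisitRouteA routes c (a.1, a.2.1) rid
        (r.1, r.2, vr)) acc

-- A's bfs: while queue: station, bus_count = queue.popleft(); …
-- (the extra fuel argument only bounds the number of loop iterations, to make the recursion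
-- structural; the proofs below show the wrapper's fuel is never exhausted before the queue empties)
def pvBfsA (routes : List (List Int)) (adj : PySem.Dict Int (PySem.Set Int)) (t : Int) :
    Nat → List (Int × Int) → PySem.Set Int → PySem.Set Int → Int
  | 0, _, _, _ => -1
  | _ + 1, [], _, _ => -1
  | fuel + 1, (st, c) :: rest, visS, visR =>
    if st = t then c
    else
      let r := pvStepA routes (adj.getD st []) c (rest, visS, visR)
      pvBfsA routes adj t fuel r.1 r.2.1 r.2.2

def find_min_bus_routes (start : Int) (breakfast : Int) (end_ : Int) (routes : List (List Int)) : Int :=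
  let adj := pvAdjA routes
  let toBreakfast := pvBfsA routes adj breakfast
    (2 * pvFree routes (PySem.Set.ofList [start]) + 1) [(start, 0)] (PySem.Set.ofList [start]) []
  if toBreakfast = -1 then -1
  else
    let toEnd := pvBfsA routes adj end_
      (2 * pvFree routes (PySem.Set.ofList [breakfast]) + 1) [(breakfast, 0)] (PySem.Set.ofList [breakfast]) []
    if toEnd = -1 then -1 else toBreakfast + toEnd

-- ===== PORT B =====
-- one sweep: for i, route in enumerate(routes):
--   if i not in used and any(s in prev for s in route): used.add(i); reached.update(route)
def pvSweep (routes : List (List Int)) (prev : PySem.Set Int)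
    (acc : PySem.Set Int × PySem.Set Int) : PySem.Set Int × PySem.Set Int :=
  (PySem.List.enumerate routes 0).foldl
    (fun a p =>
      if p.1 ∉ a.2 ∧ p.2.any (fun s => PySem.Set.contains prev s) = true then
        (PySem.Set.update a.1 p.2, PySem.Set.add a.2 p.1)
      else a) acc

-- B's while True loop: one iteration per bus; stops when the target is absorbed or the
-- reached set stops growing.  (The fuel argument only bounds the number of iterations,
-- to make the recursion structural; the wrapper below always passes enough fuel.)
def pvSatLoop (routes : List (List Int)) (t : Int) :
    Nat → PySem.Set Int → PySem.Set Int → Int → Int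
  | 0, _, _, _ => -1
  | fuel + 1, reached, used, buses =>
    let b' := buses + 1
    let r := pvSweep routes reached (reached, used)
    if t ∈ r.1 then b'
    else if r.1.length = reached.length then -1
    else pvSatLoop routes t fuel r.1 r.2 b'

-- min_buses(source, target)
def pvMinBuses (routes : List (List Int)) (source : Int) (target : Int) : Int :=
  if source = target then 0
  else pvSatLoop routes target (pvFree routes (PySem.Set.ofList [source]) + 1)
    (PySem.Set.ofList [source]) [] 0

def find_min_bus_routes_alt (start : Int) (breakfast : Int) (end_ : Int) (routes : List (List Int)) : Int :=
  let first := pvMinBuses routes start breakfast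
  if first = -1 then -1
  else
    let second := pvMinBuses routes breakfast end_
    if second = -1 then -1 else first + second

-- ===== PRECONDITION & SPEC =====
def Spec_find_min_bus_routes (start : Int) (breakfast : Int) (end_ : Int) (routes : List (List Int)) (out : Int) : Prop := out = find_min_bus_routes_alt start breakfast end_ routes
instance (start : Int) (breakfast : Int) (end_ : Int) (routes : List (List Int)) (out : Int) : Decidable (Spec_find_min_bus_routes start breakfast end_ routes out) := by unfold Spec_find_min_bus_routes; infer_instance

-- ===== CLAIM (what is proved, stated in full; the proofs are below) =====
def Claim_equal_find_min_bus_routes : Prop := ∀ (start : Int) (breakfast : Int) (end_ : Int) (routes : List (List Int)), Dom_find_min_bus_routes start breakfast end_ routes → Spec_find_min_bus_routes start breakfast end_ routes (find_min_bus_routes start breakfast end_ routes)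

-- ===== LEMMAS AND PROOFS =====

-- proof-layer devices: A's bfs is first rewritten as a level-synchronous loop (pvLoopB below,
-- over the list-valued adjacency pvAdjB), and that loop is then related to B's sweeps.
def pvAdjB (routes : List (List Int)) : PySem.Dict Int (List Int) :=
  (PySem.List.enumerate routes 0).foldl
    (fun d p => p.2.foldl (fun d st => d.insert st (d.getD st [] ++ [p.1])) d)
    PySem.Dict.empty

def pvVisitRouteB (routes : List (List Int)) (acc : List Int × PySem.Set Int) (rid : Int) :
    List Int × PySem.Set Int :=
  (PySem.List.pyGetD routes rid []).foldl
    (fun a st2 => if st2 ∈ a.2 then a else (a.1 ++ [st2], PySem.Set.add a.2 st2)) acc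

def pvStepB (routes : List (List Int)) (adjE : List Int)
    (acc : List Int × PySem.Set Int × PySem.Set Int) : List Int × PySem.Set Int × PySem.Set Int :=
  adjE.foldl
    (fun a rid =>
      if rid ∈ a.2.2 then a
      else
        let vr := PySem.Set.add a.2.2 rid
        let r := pvVisitRouteB routes (a.1, a.2.1) rid
        (r.1, r.2, vr)) acc

def pvExpandB (routes : List (List Int)) (adj : PySem.Dict Int (List Int))
    (fr : List Int) (acc : List Int × PySem.Set Int × PySem.Set Int) :
    List Int × PySem.Set Int × PySem.Set Int :=
  fr.foldl (fun a st => pvStepB routes (adj.getD st []) a) acc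

def pvLoopB (routes : List (List Int)) (adj : PySem.Dict Int (List Int)) (t : Int) :
    Nat → PySem.Set Int → List Int → PySem.Set Int → Int → Int
  | 0, _, _, _, _ => -1
  | fuel + 1, reached, frontier, used, level =>
    if t ∈ reached then level
    else
      let r := pvExpandB routes adj frontier ([], reached, used)
      if r.1 = [] then -1
      else pvLoopB routes adj t fuel r.2.1 r.1 r.2.2 (level + 1)

theorem pvRouteSub (routes : List (List Int)) (rid : Int) :
    ∀ x ∈ PySem.List.pyGetD routes rid [], x ∈ routes.flatten := by
  intro x hx
  unfold PySem.List.pyGetD at hx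
  rcases h : PySem.List.pyGet? routes rid with _ | l
  · rw [h] at hx; cases hx
  · rw [h] at hx
    simp only [Option.getD_some] at hx
    exact List.mem_flatten.mpr ⟨l, PySem.List.mem_of_pyGet?_eq_some routes h, hx⟩

theorem pvFilterLen (l : List Int) (S : PySem.Set Int) (x : Int) :
    l.Nodup → x ∈ l → x ∉ S →
    (l.filter (fun y => decide (y ∉ S) && decide (y ≠ x))).length + 1
      = (l.filter (fun y => decide (y ∉ S))).length := by
  induction l with
  | nil => intro _ hx _; cases hx
  | cons h tl ih =>
    intro hnd hx hS
    rw [List.nodup_cons] at hnd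
    by_cases hhx : h = x
    · subst hhx
      have htl : tl.filter (fun y => decide (y ∉ S) && decide (y ≠ h))
          = tl.filter (fun y => decide (y ∉ S)) := by
        apply List.filter_congr
        intro y hy
        have hne : y ≠ h := fun e => hnd.1 (e ▸ hy)
        simp [hne]
      have hp1 : (decide (h ∉ S) && decide (h ≠ h)) = false := by simp
      have hp2 : decide (h ∉ S) = true := by simp [hS]
      rw [List.filter_cons, List.filter_cons, hp1, hp2, if_neg Bool.false_ne_true, if_pos rfl,
        List.length_cons, htl]
    · have hxtl : x ∈ tl := by
        rcases List.mem_cons.mp hx with e | h'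
        · exact absurd e.symm hhx
        · exact h'
      have hih := ih hnd.2 hxtl hS
      by_cases hhS : h ∈ S
      · have hp1 : (decide (h ∉ S) && decide (h ≠ x)) = false := by simp [hhS]
        have hp2 : decide (h ∉ S) = false := by simp [hhS]
        rw [List.filter_cons, List.filter_cons, hp1, hp2, if_neg Bool.false_ne_true,
          if_neg Bool.false_ne_true]
        exact hih
      · have hp1 : (decide (h ∉ S) && decide (h ≠ x)) = true := by simp [hhS, hhx]
        have hp2 : decide (h ∉ S) = true := by simp [hhS]
        rw [List.filter_cons, List.filter_cons, hp1, hp2, if_pos rfl, if_pos rfl]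
        simp only [List.length_cons]
        omega

theorem pvFree_add (routes : List (List Int)) (S : PySem.Set Int) (x : Int)
    (hx : x ∈ routes.flatten) (hS : x ∉ S) :
    pvFree routes (PySem.Set.add S x) + 1 = pvFree routes S := by
  unfold pvFree
  have hfun : ∀ y ∈ routes.flatten.dedup,
      (decide (y ∉ PySem.Set.add S x)) = (decide (y ∉ S) && decide (y ≠ x)) := by
    intro y _
    by_cases h1 : y ∈ S <;> by_cases h2 : y = x <;> simp [PySem.Set.mem_add, h1, h2]
  rw [List.filter_congr hfun]
  exact pvFilterLen routes.flatten.dedup S x (List.nodup_dedup _) (List.mem_dedup.mpr hx) hS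

def pvInv (routes : List (List Int)) (a b : List Int × PySem.Set Int × PySem.Set Int) : Prop :=
  (∃ new, b.1 = a.1 ++ new) ∧
  (∀ x, x ∈ a.2.1 → x ∈ b.2.1) ∧
  (∀ x, x ∈ a.2.2 → x ∈ b.2.2) ∧
  (∀ x, x ∈ b.1 → x ∈ a.1 ∨ (x ∈ b.2.1 ∧ x ∉ a.2.1 ∧ x ∈ routes.flatten)) ∧
  (∀ x, x ∈ b.2.1 → x ∈ a.2.1 ∨ x ∈ b.1) ∧
  pvFree routes b.2.1 + b.1.length ≤ pvFree routes a.2.1 + a.1.length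

theorem pvInv_refl (routes : List (List Int)) (a : List Int × PySem.Set Int × PySem.Set Int) :
    pvInv routes a a := by
  refine ⟨⟨[], by simp⟩, fun x h => h, fun x h => h, fun x h => Or.inl h, fun x h => Or.inl h, le_refl _⟩

theorem pvInv_trans (routes : List (List Int)) {a b c : List Int × PySem.Set Int × PySem.Set Int}
    (h1 : pvInv routes a b) (h2 : pvInv routes b c) : pvInv routes a c := by
  obtain ⟨⟨n1, e1⟩, s1, u1, f1, g1, m1⟩ := h1
  obtain ⟨⟨n2, e2⟩, s2, u2, f2, g2, m2⟩ := h2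
  refine ⟨⟨n1 ++ n2, by rw [e2, e1, List.append_assoc]⟩, fun x h => s2 x (s1 x h),
    fun x h => u2 x (u1 x h), ?_, ?_, le_trans m2 m1⟩
  · intro x hx
    rcases f2 x hx with h | ⟨hS, hnS, hfl⟩
    · rcases f1 x h with h' | ⟨hS, hnS, hfl⟩
      · exact Or.inl h'
      · exact Or.inr ⟨s2 x hS, hnS, hfl⟩
    · refine Or.inr ⟨hS, fun hxa => hnS (s1 x hxa), hfl⟩
  · intro x hx
    rcases g2 x hx with h | h
    · rcases g1 x h with h' | h'
      · exact Or.inl h'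
      · exact Or.inr (by rw [e2]; exact List.mem_append_left _ h')
    · exact Or.inr h

theorem pvVisitFoldB_inv (routes : List (List Int)) :
    ∀ (stL : List Int), (∀ x ∈ stL, x ∈ routes.flatten) →
    ∀ (nf : List Int) (S U : PySem.Set Int),
      pvInv routes (nf, S, U)
        ((stL.foldl (fun a st2 => if st2 ∈ a.2 then a
            else (a.1 ++ [st2], PySem.Set.add a.2 st2)) (nf, S)).1,
         (stL.foldl (fun a st2 => if st2 ∈ a.2 then a
            else (a.1 ++ [st2], PySem.Set.add a.2 st2)) (nf, S)).2, U) := by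
  intro stL
  induction stL with
  | nil => intro _ nf S U; exact pvInv_refl routes (nf, S, U)
  | cons st2 tl ih =>
    intro hsub nf S U
    rw [List.foldl_cons]
    by_cases h2 : st2 ∈ S
    · rw [if_pos (show st2 ∈ (nf, S).2 from h2)]
      exact ih (fun x hx => hsub x (List.mem_cons_of_mem _ hx)) nf S U
    · rw [if_neg (show st2 ∉ (nf, S).2 from h2)]
      have hstep : pvInv routes (nf, S, U) (nf ++ [st2], PySem.Set.add S st2, U) := by
        refine ⟨⟨[st2], rfl⟩, fun x hx => (PySem.Set.mem_add S st2 x).mpr (Or.inl hx),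
          fun x hx => hx, ?_, ?_, ?_⟩
        · intro x hx
          rcases List.mem_append.mp hx with h | h
          · exact Or.inl h
          · have hx2 : x = st2 := by simpa using h
            subst hx2
            exact Or.inr ⟨(PySem.Set.mem_add S x x).mpr (Or.inr rfl), h2,
              hsub x List.mem_cons_self⟩
        · intro x hx
          rcases (PySem.Set.mem_add S st2 x).mp hx with h | h
          · exact Or.inl h
          · exact Or.inr (List.mem_append.mpr (Or.inr (by simp [h])))
        · have := pvFree_add routes S st2 (hsub st2 List.mem_cons_self) h2
          simp only [List.length_append, List.length_cons, List.length_nil]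
          omega
      exact pvInv_trans routes hstep
        (ih (fun x hx => hsub x (List.mem_cons_of_mem _ hx)) (nf ++ [st2]) (PySem.Set.add S st2) U)

theorem pvVisitB_inv (routes : List (List Int)) (rid : Int) :
    ∀ (nf : List Int) (S U : PySem.Set Int),
      pvInv routes (nf, S, U)
        ((pvVisitRouteB routes (nf, S) rid).1, (pvVisitRouteB routes (nf, S) rid).2, U) := by
  intro nf S U
  unfold pvVisitRouteB
  exact pvVisitFoldB_inv routes _ (pvRouteSub routes rid) nf S U

theorem pvStepB_inv (routes : List (List Int)) :
    ∀ (adjE : List Int) (acc : List Int × PySem.Set Int × PySem.Set Int),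
      pvInv routes acc (pvStepB routes adjE acc) := by
  intro adjE
  unfold pvStepB
  induction adjE with
  | nil => intro acc; exact pvInv_refl routes acc
  | cons rid tl ih =>
    intro acc
    rw [List.foldl_cons]
    by_cases h : rid ∈ acc.2.2
    · rw [if_pos h]
      exact ih acc
    · rw [if_neg h]
      dsimp only
      have hv := pvVisitB_inv routes rid acc.1 acc.2.1 acc.2.2
      have hstep : pvInv routes (acc.1, acc.2.1, acc.2.2)
          ((pvVisitRouteB routes (acc.1, acc.2.1) rid).1,
           (pvVisitRouteB routes (acc.1, acc.2.1) rid).2, PySem.Set.add acc.2.2 rid) := by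
        obtain ⟨e, s1, _, f1, g1, m1⟩ := hv
        exact ⟨e, s1, fun x hx => (PySem.Set.mem_add _ _ _).mpr (Or.inl hx), f1, g1, m1⟩
      exact pvInv_trans routes hstep (ih _)

theorem pvExpandB_inv (routes : List (List Int)) (adj : PySem.Dict Int (List Int)) :
    ∀ (fr : List Int) (acc : List Int × PySem.Set Int × PySem.Set Int),
      pvInv routes acc (pvExpandB routes adj fr acc) := by
  intro fr
  unfold pvExpandB
  induction fr with
  | nil => intro acc; exact pvInv_refl routes acc
  | cons st fr' ih =>
    intro acc
    rw [List.foldl_cons]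
    exact pvInv_trans routes (pvStepB_inv routes (adj.getD st []) acc) (ih _)

theorem pvFree_lt (routes : List (List Int)) (S S' : PySem.Set Int) (x : Int)
    (hmono : ∀ y, y ∈ S → y ∈ S') (hx : x ∈ routes.flatten) (hxS : x ∉ S) (hxS' : x ∈ S') :
    pvFree routes S' < pvFree routes S := by
  unfold pvFree
  have hsubl : routes.flatten.dedup.filter (fun y => decide (y ∉ S'))
      = (routes.flatten.dedup.filter (fun y => decide (y ∉ S))).filter
          (fun y => decide (y ∉ S')) := by
    rw [List.filter_filter]
    apply List.filter_congr
    intro y _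
    by_cases hy : y ∈ S'
    · simp [hy]
    · have hyS : y ∉ S := fun h => hy (hmono y h)
      simp [hy, hyS]
  have hsb : (routes.flatten.dedup.filter (fun y => decide (y ∉ S'))).Sublist
      (routes.flatten.dedup.filter (fun y => decide (y ∉ S))) := by
    rw [hsubl]
    exact List.filter_sublist
  rcases lt_or_eq_of_le hsb.length_le with h | h
  · exact h
  · exfalso
    have heq := hsb.eq_of_length h
    have hxin : x ∈ routes.flatten.dedup.filter (fun y => decide (y ∉ S)) :=
      List.mem_filter.mpr ⟨List.mem_dedup.mpr hx, by simp [hxS]⟩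
    rw [← heq] at hxin
    have := (List.mem_filter.mp hxin).2
    simp [hxS'] at this

-- A's and B's inner route loops correspond: A carries the same queue entries tagged with c+1
theorem pvVisit_corr (routes : List (List Int)) (c rid : Int) (q : List (Int × Int)) :
    ∀ (nf : List Int) (S : PySem.Set Int),
      pvVisitRouteA routes c (q ++ nf.map (fun s => (s, c + 1)), S) rid
        = (q ++ (pvVisitRouteB routes (nf, S) rid).1.map (fun s => (s, c + 1)),
           (pvVisitRouteB routes (nf, S) rid).2) := by
  intro nf S
  unfold pvVisitRouteA pvVisitRouteB
  generalize PySem.List.pyGetD routes rid [] = stL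
  induction stL generalizing nf S with
  | nil => simp
  | cons st2 tl ih =>
    rw [List.foldl_cons, List.foldl_cons]
    by_cases h : st2 ∈ S
    · rw [if_pos (show st2 ∈ (q ++ nf.map (fun s => (s, c + 1)), S).2 from h),
        if_pos (show st2 ∈ (nf, S).2 from h)]
      exact ih nf S
    · rw [if_neg (show st2 ∉ (q ++ nf.map (fun s => (s, c + 1)), S).2 from h),
        if_neg (show st2 ∉ (nf, S).2 from h)]
      dsimp only
      have harr : (q ++ nf.map (fun s => (s, c + 1))) ++ [(st2, c + 1)]
          = q ++ (nf ++ [st2]).map (fun s => (s, c + 1)) := by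
        simp [List.map_append]
      rw [harr]
      exact ih (nf ++ [st2]) (PySem.Set.add S st2)

theorem pvStep_corr (routes : List (List Int)) (c : Int) (q : List (Int × Int)) :
    ∀ (adjE : List Int) (nf : List Int) (S U : PySem.Set Int),
      pvStepA routes adjE c (q ++ nf.map (fun s => (s, c + 1)), S, U)
        = (q ++ (pvStepB routes adjE (nf, S, U)).1.map (fun s => (s, c + 1)),
           (pvStepB routes adjE (nf, S, U)).2.1, (pvStepB routes adjE (nf, S, U)).2.2) := by
  intro adjE
  unfold pvStepA pvStepB
  induction adjE with
  | nil => intro nf S U; simp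
  | cons rid tl ih =>
    intro nf S U
    rw [List.foldl_cons, List.foldl_cons]
    by_cases h : rid ∈ U
    · rw [if_pos (show rid ∈ ((q ++ nf.map (fun s => (s, c + 1)), S, U) :
          List (Int × Int) × PySem.Set Int × PySem.Set Int).2.2 from h),
        if_pos (show rid ∈ ((nf, S, U) : List Int × PySem.Set Int × PySem.Set Int).2.2 from h)]
      exact ih nf S U
    · rw [if_neg (show rid ∉ ((q ++ nf.map (fun s => (s, c + 1)), S, U) :
          List (Int × Int) × PySem.Set Int × PySem.Set Int).2.2 from h),
        if_neg (show rid ∉ ((nf, S, U) : List Int × PySem.Set Int × PySem.Set Int).2.2 from h)]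
      dsimp only
      rw [pvVisit_corr routes c rid q nf S]
      exact ih (pvVisitRouteB routes (nf, S) rid).1 (pvVisitRouteB routes (nf, S) rid).2
        (PySem.Set.add U rid)

-- processing a list of route ids skips already-seen ids, so dedup (Set.ofList) does not matter

theorem pvStepB_cons (routes : List (List Int)) (y : Int) (tl : List Int)
    (acc : List Int × PySem.Set Int × PySem.Set Int) :
    pvStepB routes (y :: tl) acc = pvStepB routes tl (pvStepB routes [y] acc) := rfl

theorem pvStepB_singleton_skip (routes : List (List Int)) (y : Int)
    (acc : List Int × PySem.Set Int × PySem.Set Int) (h : y ∈ acc.2.2) :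
    pvStepB routes [y] acc = acc := by
  unfold pvStepB
  rw [List.foldl_cons, if_pos h, List.foldl_nil]

theorem pvStepB_singleton_U (routes : List (List Int)) (y x : Int)
    (acc : List Int × PySem.Set Int × PySem.Set Int) (h : x ∈ acc.2.2) :
    x ∈ (pvStepB routes [y] acc).2.2 := by
  unfold pvStepB
  rw [List.foldl_cons, List.foldl_nil]
  by_cases hy : y ∈ acc.2.2
  · rw [if_pos hy]; exact h
  · rw [if_neg hy]
    exact (PySem.Set.mem_add _ _ _).mpr (Or.inl h)

theorem pvStepB_skip (routes : List (List Int)) (x : Int) :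
    ∀ (l : List Int) (acc : List Int × PySem.Set Int × PySem.Set Int), x ∈ acc.2.2 →
      pvStepB routes l acc = pvStepB routes (PySem.Set.discard l x) acc := by
  intro l
  induction l with
  | nil => intro acc _; rfl
  | cons y tl ih =>
    intro acc hx
    by_cases hyx : y = x
    · subst hyx
      have hd : PySem.Set.discard (y :: tl) y = PySem.Set.discard tl y := by
        simp [PySem.Set.discard]
      rw [hd, pvStepB_cons routes y tl acc, pvStepB_singleton_skip routes y acc hx]
      exact ih acc hx
    · have hd : PySem.Set.discard (y :: tl) x = y :: PySem.Set.discard tl x := by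
        simp [PySem.Set.discard, hyx]
      rw [hd, pvStepB_cons routes y tl acc,
        pvStepB_cons routes y (PySem.Set.discard tl x) acc]
      exact ih _ (pvStepB_singleton_U routes y x acc hx)

theorem pvStepB_ofList (routes : List (List Int)) :
    ∀ (l : List Int) (acc : List Int × PySem.Set Int × PySem.Set Int),
      pvStepB routes (PySem.Set.ofList l) acc = pvStepB routes l acc := by
  intro l
  induction l with
  | nil => intro acc; rfl
  | cons y tl ih =>
    intro acc
    rw [PySem.Set.ofList_cons,
      pvStepB_cons routes y ((PySem.Set.ofList tl).discard y) acc,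
      pvStepB_cons routes y tl acc]
    have hy : y ∈ (pvStepB routes [y] acc).2.2 := by
      unfold pvStepB
      rw [List.foldl_cons, List.foldl_nil]
      by_cases h : y ∈ acc.2.2
      · rw [if_pos h]; exact h
      · rw [if_neg h]
        exact (PySem.Set.mem_add _ _ _).mpr (Or.inr rfl)
    rw [← pvStepB_skip routes y (PySem.Set.ofList tl) _ hy]
    exact ih _

-- A's defaultdict-of-sets adjacency is the dedup of the list-valued adjacency

theorem pvAdjInner_eq (i : Int) :
    ∀ (stL : List Int) (dA : PySem.Dict Int (PySem.Set Int)) (dB : PySem.Dict Int (List Int)),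
      (∀ st, dA.getD st [] = PySem.Set.ofList (dB.getD st [])) →
      ∀ st, (stL.foldl (fun d st => d.insert st (PySem.Set.add (d.getD st []) i)) dA).getD st []
        = PySem.Set.ofList ((stL.foldl (fun d st => d.insert st (d.getD st [] ++ [i])) dB).getD st []) := by
  intro stL
  induction stL with
  | nil => intro dA dB h st; exact h st
  | cons s0 tl ih =>
    intro dA dB h st
    rw [List.foldl_cons, List.foldl_cons]
    apply ih
    intro st'
    rw [PySem.Dict.getD_insert, PySem.Dict.getD_insert]
    by_cases hs : st' = s0
    · rw [if_pos hs, if_pos hs, PySem.Set.ofList_append_singleton, h s0]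
    · rw [if_neg hs, if_neg hs]
      exact h st'

theorem pvAdjOuter_eq :
    ∀ (L : List (Int × List Int)) (dA : PySem.Dict Int (PySem.Set Int)) (dB : PySem.Dict Int (List Int)),
      (∀ st, dA.getD st [] = PySem.Set.ofList (dB.getD st [])) →
      ∀ st, (L.foldl (fun d p => p.2.foldl (fun d st => d.insert st (PySem.Set.add (d.getD st []) p.1)) d) dA).getD st []
        = PySem.Set.ofList ((L.foldl (fun d p => p.2.foldl (fun d st => d.insert st (d.getD st [] ++ [p.1])) d) dB).getD st []) := by
  intro L
  induction L with
  | nil => intro dA dB h st; exact h st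
  | cons p tl ihL =>
    intro dA dB h st
    rw [List.foldl_cons, List.foldl_cons]
    exact ihL _ _ (pvAdjInner_eq p.1 p.2 dA dB h) st

theorem pvAdj_eq (routes : List (List Int)) :
    ∀ st, (pvAdjA routes).getD st [] = PySem.Set.ofList ((pvAdjB routes).getD st []) := by
  intro st
  unfold pvAdjA pvAdjB
  exact pvAdjOuter_eq (PySem.List.enumerate routes 0) PySem.Dict.empty PySem.Dict.empty
    (fun st' => by rw [PySem.Dict.getD_empty]; rfl) st

-- combined: one popped station of A = one frontier station of the level loop

theorem pvStep_AB (routes : List (List Int)) (c : Int) (q : List (Int × Int))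
    (st : Int) (nf : List Int) (S U : PySem.Set Int) :
    pvStepA routes ((pvAdjA routes).getD st []) c (q ++ nf.map (fun s => (s, c + 1)), S, U)
      = (q ++ (pvStepB routes ((pvAdjB routes).getD st []) (nf, S, U)).1.map (fun s => (s, c + 1)),
         (pvStepB routes ((pvAdjB routes).getD st []) (nf, S, U)).2.1,
         (pvStepB routes ((pvAdjB routes).getD st []) (nf, S, U)).2.2) := by
  rw [pvAdj_eq routes st, ← pvStepB_ofList routes ((pvAdjB routes).getD st [])]
  exact pvStep_corr routes c q _ nf S U

-- with an empty queue A returns -1 at any fuel (the fuel-0 branch agrees by construction)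
theorem pvBfsA_nil (routes : List (List Int)) (adj : PySem.Dict Int (PySem.Set Int)) (t : Int)
    (fuel : Nat) (S U : PySem.Set Int) : pvBfsA routes adj t fuel [] S U = -1 := by
  cases fuel <;> rfl

-- if the target is in the current level's frontier, A returns the current count
theorem pvBfsA_found (routes : List (List Int)) (t : Int) (k : Int) :
    ∀ (fr nf : List Int) (S U : PySem.Set Int) (fuel : Nat), t ∈ fr → fr.length ≤ fuel →
      pvBfsA routes (pvAdjA routes) t fuel
          (fr.map (fun s => (s, k)) ++ nf.map (fun s => (s, k + 1))) S U = k := by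
  intro fr
  induction fr with
  | nil => intro nf S U fuel h _; cases h
  | cons s fr' ih =>
    intro nf S U fuel ht hlen
    rcases fuel with _ | fuel
    · simp at hlen
    · have hlen' : fr'.length ≤ fuel := by simp at hlen; omega
      rw [List.map_cons, List.cons_append, pvBfsA]
      by_cases hst : s = t
      · rw [if_pos hst]
      · rw [if_neg hst]
        dsimp only
        rw [pvStep_AB routes k (fr'.map (fun s => (s, k))) s nf S U]
        have ht' : t ∈ fr' := by
          rcases List.mem_cons.mp ht with e | h'
          · exact absurd e.symm hst
          · exact h'
        exact ih _ _ _ fuel ht' hlen'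

-- processing one whole level of A = one pvExpandB (one unit of fuel per popped station)
theorem pvBfsA_level (routes : List (List Int)) (t : Int) (k : Int) :
    ∀ (fr nf : List Int) (S U : PySem.Set Int) (fuel : Nat), (∀ x ∈ fr, x ≠ t) →
      pvBfsA routes (pvAdjA routes) t (fuel + fr.length)
          (fr.map (fun s => (s, k)) ++ nf.map (fun s => (s, k + 1))) S U
        = pvBfsA routes (pvAdjA routes) t fuel
            ((pvExpandB routes (pvAdjB routes) fr (nf, S, U)).1.map (fun s => (s, k + 1)))
            (pvExpandB routes (pvAdjB routes) fr (nf, S, U)).2.1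
            (pvExpandB routes (pvAdjB routes) fr (nf, S, U)).2.2 := by
  intro fr
  induction fr with
  | nil =>
    intro nf S U fuel _
    rw [List.map_nil, List.nil_append]
    rfl
  | cons s fr' ih =>
    intro nf S U fuel h
    have hs : s ≠ t := h s List.mem_cons_self
    have hfl : fuel + (s :: fr').length = (fuel + fr'.length) + 1 := rfl
    rw [hfl, List.map_cons, List.cons_append, pvBfsA, if_neg hs]
    dsimp only
    rw [pvStep_AB routes k (fr'.map (fun s => (s, k))) s nf S U]
    have hexp : pvExpandB routes (pvAdjB routes) (s :: fr') (nf, S, U)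
        = pvExpandB routes (pvAdjB routes) fr'
            (pvStepB routes ((pvAdjB routes).getD s []) (nf, S, U)) := rfl
    rw [hexp]
    exact ih _ _ _ fuel (fun x hx => h x (List.mem_cons_of_mem _ hx))

-- the A-side simulation: A's queue bfs = the level-synchronous loop (with sufficient fuel)
theorem pvBfs_eq_loop (routes : List (List Int)) (t : Int) :
    ∀ (N : Nat) (S : PySem.Set Int) (fr : List Int) (U : PySem.Set Int) (k : Int)
      (fuelA fuelB : Nat),
      pvFree routes S ≤ N → t ∉ S → (∀ x ∈ fr, x ∈ S) →
      2 * pvFree routes S + fr.length ≤ fuelA → pvFree routes S + 1 ≤ fuelB →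
      pvBfsA routes (pvAdjA routes) t fuelA (fr.map (fun s => (s, k))) S U
        = pvLoopB routes (pvAdjB routes) t fuelB S fr U k := by
  intro N
  induction N using Nat.strong_induction_on with
  | _ N ih =>
    intro S fr U k fuelA fuelB hN htS hfrS hfA hfB
    rcases fuelB with _ | fuelB
    · omega
    rw [pvLoopB, if_neg htS]
    dsimp only
    obtain ⟨⟨new, hnew⟩, s1, u1, f1, g1, m1⟩ :=
      pvExpandB_inv routes (pvAdjB routes) fr (([] : List Int), S, U)
    have hm1 : pvFree routes (pvExpandB routes (pvAdjB routes) fr (([] : List Int), S, U)).2.1 + (pvExpandB routes (pvAdjB routes) fr (([] : List Int), S, U)).1.length ≤ pvFree routes S := by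
      simpa using m1
    obtain ⟨fuelA', rfl⟩ : ∃ m, fuelA = m + fr.length := ⟨fuelA - fr.length, by omega⟩
    have hL := pvBfsA_level routes t k fr [] S U fuelA'
      (fun x hx => fun he => htS (he ▸ hfrS x hx))
    simp only [List.map_nil, List.append_nil] at hL
    by_cases h1 : (pvExpandB routes (pvAdjB routes) fr (([] : List Int), S, U)).1 = []
    · rw [hL, h1, List.map_nil, pvBfsA_nil, if_pos rfl]
    · rw [if_neg h1]
      obtain ⟨x, hxE⟩ : ∃ x, x ∈ (pvExpandB routes (pvAdjB routes) fr (([] : List Int), S, U)).1 := by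
        rcases e : (pvExpandB routes (pvAdjB routes) fr (([] : List Int), S, U)).1 with _ | ⟨x, tl⟩
        · exact absurd e h1
        · exact ⟨x, List.mem_cons_self⟩
      rcases f1 x hxE with h0 | ⟨hxS', hxS, hxfl⟩
      · cases h0
      · have hlt : pvFree routes (pvExpandB routes (pvAdjB routes) fr (([] : List Int), S, U)).2.1 < pvFree routes S :=
          pvFree_lt routes S _ x s1 hxfl hxS hxS'
        by_cases h2 : t ∈ (pvExpandB routes (pvAdjB routes) fr (([] : List Int), S, U)).2.1
        · have htE : t ∈ (pvExpandB routes (pvAdjB routes) fr (([] : List Int), S, U)).1 := by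
            rcases g1 t h2 with h | h
            · exact absurd h htS
            · exact h
          have hfound := pvBfsA_found routes t (k + 1) (pvExpandB routes (pvAdjB routes) fr (([] : List Int), S, U)).1 []
            (pvExpandB routes (pvAdjB routes) fr (([] : List Int), S, U)).2.1
            (pvExpandB routes (pvAdjB routes) fr (([] : List Int), S, U)).2.2 fuelA' htE (by omega)
          simp only [List.map_nil, List.append_nil] at hfound
          rw [hL, hfound]
          rcases fuelB with _ | fuelB2
          · omega
          rw [pvLoopB, if_pos h2]
        · have hfr' : ∀ x ∈ (pvExpandB routes (pvAdjB routes) fr (([] : List Int), S, U)).1, x ∈ (pvExpandB routes (pvAdjB routes) fr (([] : List Int), S, U)).2.1 := by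
            intro y hy
            rcases f1 y hy with h | ⟨h, _, _⟩
            · cases h
            · exact h
          rw [hL]
          exact ih (pvFree routes (pvExpandB routes (pvAdjB routes) fr (([] : List Int), S, U)).2.1) (by omega)
            _ _ _ (k + 1) fuelA' fuelB (le_refl _) h2 hfr' (by omega) (by omega)

theorem pvTop (routes : List (List Int)) (s t : Int) :
    pvBfsA routes (pvAdjA routes) t (2 * pvFree routes (PySem.Set.ofList [s]) + 1)
        [(s, 0)] (PySem.Set.ofList [s]) []
      = pvLoopB routes (pvAdjB routes) t (pvFree routes (PySem.Set.ofList [s]) + 1)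
          (PySem.Set.ofList [s]) [s] [] 0 := by
  have hof : PySem.Set.ofList [s] = [s] := rfl
  by_cases hts : s = t
  · subst hts
    rw [pvBfsA, if_pos rfl, pvLoopB, if_pos (by rw [hof]; exact List.mem_cons_self)]
  · have h1 : t ∉ PySem.Set.ofList [s] := by
      rw [hof]
      simp only [List.mem_singleton]
      exact fun h => hts h.symm
    have := pvBfs_eq_loop routes t (pvFree routes (PySem.Set.ofList [s]))
      (PySem.Set.ofList [s]) [s] [] 0
      (2 * pvFree routes (PySem.Set.ofList [s]) + 1) (pvFree routes (PySem.Set.ofList [s]) + 1)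
      (le_refl _) h1 (fun x hx => by rw [hof]; exact hx) (by simp) (le_refl _)
    simpa using this

-- ===== membership characterizations of one level, on both sides =====

theorem pvVisitFoldB_mem (x : Int) :
    ∀ (stL : List Int) (nf : List Int) (S : PySem.Set Int),
      x ∈ (stL.foldl (fun a st2 => if st2 ∈ a.2 then a
            else (a.1 ++ [st2], PySem.Set.add a.2 st2)) (nf, S)).2
        ↔ x ∈ S ∨ x ∈ stL := by
  intro stL
  induction stL with
  | nil => intro nf S; simp
  | cons st2 tl ih =>
    intro nf S
    rw [List.foldl_cons]
    by_cases h : st2 ∈ S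
    · rw [if_pos (show st2 ∈ (nf, S).2 from h)]
      rw [ih]
      constructor
      · rintro (h' | h')
        · exact Or.inl h'
        · exact Or.inr (List.mem_cons_of_mem _ h')
      · rintro (h' | h')
        · exact Or.inl h'
        · rcases List.mem_cons.mp h' with e | e
          · exact Or.inl (e ▸ h)
          · exact Or.inr e
    · rw [if_neg (show st2 ∉ (nf, S).2 from h)]
      dsimp only
      rw [ih]
      rw [PySem.Set.mem_add]
      constructor
      · rintro ((h' | h') | h')
        · exact Or.inl h'
        · exact Or.inr (List.mem_cons.mpr (Or.inl h'))
        · exact Or.inr (List.mem_cons_of_mem _ h')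
      · rintro (h' | h')
        · exact Or.inl (Or.inl h')
        · rcases List.mem_cons.mp h' with e | e
          · exact Or.inl (Or.inr e)
          · exact Or.inr e

theorem pvVisitB_mem (routes : List (List Int)) (rid : Int) (nf : List Int)
    (S : PySem.Set Int) (x : Int) :
    x ∈ (pvVisitRouteB routes (nf, S) rid).2 ↔ x ∈ S ∨ x ∈ PySem.List.pyGetD routes rid [] := by
  unfold pvVisitRouteB
  exact pvVisitFoldB_mem x _ nf S

theorem pvStepB_mem_U (routes : List (List Int)) (i : Int) :
    ∀ (adjE : List Int) (acc : List Int × PySem.Set Int × PySem.Set Int),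
      i ∈ (pvStepB routes adjE acc).2.2 ↔ i ∈ acc.2.2 ∨ i ∈ adjE := by
  intro adjE
  unfold pvStepB
  induction adjE with
  | nil => intro acc; simp
  | cons rid tl ih =>
    intro acc
    rw [List.foldl_cons]
    by_cases h : rid ∈ acc.2.2
    · rw [if_pos h, ih]
      constructor
      · rintro (h' | h')
        · exact Or.inl h'
        · exact Or.inr (List.mem_cons_of_mem _ h')
      · rintro (h' | h')
        · exact Or.inl h'
        · rcases List.mem_cons.mp h' with e | e
          · exact Or.inl (e ▸ h)
          · exact Or.inr e
    · rw [if_neg h]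
      dsimp only
      rw [ih]
      dsimp only
      rw [PySem.Set.mem_add]
      constructor
      · rintro ((h' | h') | h')
        · exact Or.inl h'
        · exact Or.inr (List.mem_cons.mpr (Or.inl h'))
        · exact Or.inr (List.mem_cons_of_mem _ h')
      · rintro (h' | h')
        · exact Or.inl (Or.inl h')
        · rcases List.mem_cons.mp h' with e | e
          · exact Or.inl (Or.inr e)
          · exact Or.inr e

theorem pvStepB_mem_S (routes : List (List Int)) (x : Int) :
    ∀ (adjE : List Int) (acc : List Int × PySem.Set Int × PySem.Set Int),
      x ∈ (pvStepB routes adjE acc).2.1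
        ↔ x ∈ acc.2.1 ∨ ∃ rid ∈ adjE, rid ∉ acc.2.2 ∧ x ∈ PySem.List.pyGetD routes rid [] := by
  intro adjE
  unfold pvStepB
  induction adjE with
  | nil => intro acc; simp
  | cons rid tl ih =>
    intro acc
    rw [List.foldl_cons]
    by_cases h : rid ∈ acc.2.2
    · rw [if_pos h, ih]
      constructor
      · rintro (h' | ⟨r, hr, hrU, hx⟩)
        · exact Or.inl h'
        · exact Or.inr ⟨r, List.mem_cons_of_mem _ hr, hrU, hx⟩
      · rintro (h' | ⟨r, hr, hrU, hx⟩)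
        · exact Or.inl h'
        · rcases List.mem_cons.mp hr with e | e
          · exact absurd (e ▸ h) hrU
          · exact Or.inr ⟨r, e, hrU, hx⟩
    · rw [if_neg h]
      dsimp only
      rw [ih]
      dsimp only
      rw [pvVisitB_mem]
      constructor
      · rintro ((h' | h') | ⟨r, hr, hrU, hx⟩)
        · exact Or.inl h'
        · exact Or.inr ⟨rid, List.mem_cons_self, h, h'⟩
        · have hrU' : r ∉ acc.2.2 := fun hc => hrU ((PySem.Set.mem_add _ _ _).mpr (Or.inl hc))
          exact Or.inr ⟨r, List.mem_cons_of_mem _ hr, hrU', hx⟩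
      · rintro (h' | ⟨r, hr, hrU, hx⟩)
        · exact Or.inl (Or.inl h')
        · rcases List.mem_cons.mp hr with e | e
          · subst e
            exact Or.inl (Or.inr hx)
          · by_cases hrr : r = rid
            · subst hrr
              exact Or.inl (Or.inr hx)
            · have : r ∉ PySem.Set.add acc.2.2 rid := by
                rw [PySem.Set.mem_add]
                rintro (hc | hc)
                · exact hrU hc
                · exact hrr hc
              exact Or.inr ⟨r, e, this, hx⟩

theorem pvExpandB_mem_U (routes : List (List Int)) (adj : PySem.Dict Int (List Int)) (i : Int) :
    ∀ (fr : List Int) (acc : List Int × PySem.Set Int × PySem.Set Int),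
      i ∈ (pvExpandB routes adj fr acc).2.2
        ↔ i ∈ acc.2.2 ∨ ∃ st ∈ fr, i ∈ adj.getD st [] := by
  intro fr
  unfold pvExpandB
  induction fr with
  | nil => intro acc; simp
  | cons st tl ih =>
    intro acc
    rw [List.foldl_cons, ih, pvStepB_mem_U]
    constructor
    · rintro ((h | h) | ⟨st', hst', h⟩)
      · exact Or.inl h
      · exact Or.inr ⟨st, List.mem_cons_self, h⟩
      · exact Or.inr ⟨st', List.mem_cons_of_mem _ hst', h⟩
    · rintro (h | ⟨st', hst', h⟩)
      · exact Or.inl (Or.inl h)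
      · rcases List.mem_cons.mp hst' with e | e
        · exact Or.inl (Or.inr (e ▸ h))
        · exact Or.inr ⟨st', e, h⟩

theorem pvExpandB_mem_S (routes : List (List Int)) (adj : PySem.Dict Int (List Int)) (x : Int) :
    ∀ (fr : List Int) (acc : List Int × PySem.Set Int × PySem.Set Int),
      x ∈ (pvExpandB routes adj fr acc).2.1
        ↔ x ∈ acc.2.1 ∨ ∃ rid, rid ∉ acc.2.2 ∧ (∃ st ∈ fr, rid ∈ adj.getD st [])
            ∧ x ∈ PySem.List.pyGetD routes rid [] := by
  intro fr
  unfold pvExpandB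
  induction fr with
  | nil => intro acc; simp
  | cons st tl ih =>
    intro acc
    rw [List.foldl_cons, ih, pvStepB_mem_S]
    constructor
    · rintro ((h | ⟨r, hr, hrU, hx⟩) | ⟨r, hrU, ⟨st', hst', hadj⟩, hx⟩)
      · exact Or.inl h
      · exact Or.inr ⟨r, hrU, ⟨st, List.mem_cons_self, hr⟩, hx⟩
      · have hrU' : r ∉ acc.2.2 := fun hc => hrU ((pvStepB_mem_U routes r _ acc).mpr (Or.inl hc))
        exact Or.inr ⟨r, hrU', ⟨st', List.mem_cons_of_mem _ hst', hadj⟩, hx⟩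
    · rintro (h | ⟨r, hrU, ⟨st', hst', hadj⟩, hx⟩)
      · exact Or.inl (Or.inl h)
      · by_cases hr0 : r ∈ adj.getD st []
        · exact Or.inl (Or.inr ⟨r, hr0, hrU, hx⟩)
        · rcases List.mem_cons.mp hst' with e | e
          · exact absurd (e ▸ hadj) hr0
          · have : r ∉ (pvStepB routes (adj.getD st []) acc).2.2 := by
              rw [pvStepB_mem_U]
              rintro (hc | hc)
              · exact hrU hc
              · exact hr0 hc
            exact Or.inr ⟨r, this, ⟨st', e, hadj⟩, hx⟩

-- membership in the list-valued adjacency = being an enumerate entry through that station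

theorem pvAdjB_inner_mem (j : Int) :
    ∀ (stL : List Int) (d : PySem.Dict Int (List Int)) (s i : Int),
      i ∈ (stL.foldl (fun d st => d.insert st (d.getD st [] ++ [j])) d).getD s []
        ↔ i ∈ d.getD s [] ∨ (i = j ∧ s ∈ stL) := by
  intro stL
  induction stL with
  | nil => intro d s i; simp
  | cons st0 tl ih =>
    intro d s i
    rw [List.foldl_cons, ih]
    rw [PySem.Dict.getD_insert]
    by_cases hs : s = st0
    · rw [if_pos hs]
      subst hs
      constructor
      · rintro (h | ⟨hij, hstl⟩)
        · rcases List.mem_append.mp h with h' | h'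
          · exact Or.inl h'
          · have : i = j := by simpa using h'
            exact Or.inr ⟨this, List.mem_cons_self⟩
        · exact Or.inr ⟨hij, List.mem_cons_of_mem _ hstl⟩
      · rintro (h | ⟨hij, _⟩)
        · exact Or.inl (List.mem_append_left _ h)
        · exact Or.inl (List.mem_append_right _ (by simp [hij]))
    · rw [if_neg hs]
      constructor
      · rintro (h | ⟨hij, hstl⟩)
        · exact Or.inl h
        · exact Or.inr ⟨hij, List.mem_cons_of_mem _ hstl⟩
      · rintro (h | ⟨hij, hstl⟩)
        · exact Or.inl h
        · rcases List.mem_cons.mp hstl with e | e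
          · exact absurd e hs
          · exact Or.inr ⟨hij, e⟩

theorem pvAdjB_fold_mem :
    ∀ (L : List (Int × List Int)) (d : PySem.Dict Int (List Int)) (s i : Int),
      i ∈ (L.foldl (fun d p => p.2.foldl (fun d st => d.insert st (d.getD st [] ++ [p.1])) d) d).getD s []
        ↔ i ∈ d.getD s [] ∨ ∃ p ∈ L, p.1 = i ∧ s ∈ p.2 := by
  intro L
  induction L with
  | nil => intro d s i; simp
  | cons p0 tl ih =>
    intro d s i
    rw [List.foldl_cons, ih, pvAdjB_inner_mem]
    constructor
    · rintro ((h | ⟨hij, hs⟩) | ⟨p, hp, h1, h2⟩)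
      · exact Or.inl h
      · exact Or.inr ⟨p0, List.mem_cons_self, hij.symm, hs⟩
      · exact Or.inr ⟨p, List.mem_cons_of_mem _ hp, h1, h2⟩
    · rintro (h | ⟨p, hp, h1, h2⟩)
      · exact Or.inl (Or.inl h)
      · rcases List.mem_cons.mp hp with e | e
        · subst e
          exact Or.inl (Or.inr ⟨h1.symm, h2⟩)
        · exact Or.inr ⟨p, e, h1, h2⟩

theorem pvAdjB_mem (routes : List (List Int)) (s i : Int) :
    i ∈ (pvAdjB routes).getD s []
      ↔ ∃ p ∈ PySem.List.enumerate routes 0, p.1 = i ∧ s ∈ p.2 := by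
  unfold pvAdjB
  rw [pvAdjB_fold_mem]
  rw [PySem.Dict.getD_empty]
  simp

-- enumerate facts

theorem pvEnumGet (routes : List (List Int)) (p : Int × List Int)
    (hp : p ∈ PySem.List.enumerate routes 0) :
    0 ≤ p.1 ∧ PySem.List.pyGetD routes p.1 [] = p.2 := by
  rw [PySem.List.mem_enumerate_iff] at hp
  obtain ⟨k, hk, rfl⟩ := hp
  refine ⟨by simp, ?_⟩
  simp only [zero_add]
  rw [PySem.List.pyGetD_natCast]
  exact List.getD_eq_getElem routes [] (by simpa using hk)

theorem pvEnumUnique (routes : List (List Int)) (p q : Int × List Int)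
    (hp : p ∈ PySem.List.enumerate routes 0) (hq : q ∈ PySem.List.enumerate routes 0)
    (h : p.1 = q.1) : p = q := by
  rw [PySem.List.mem_enumerate_iff] at hp hq
  obtain ⟨k, hk, rfl⟩ := hp
  obtain ⟨k', hk', rfl⟩ := hq
  simp only [zero_add] at h
  have : k = k' := by exact_mod_cast h
  subst this
  rfl

theorem pvEnumOf (routes : List (List Int)) (i : Int) (hi : 0 ≤ i)
    (hne : PySem.List.pyGetD routes i [] ≠ []) :
    ∃ p ∈ PySem.List.enumerate routes 0, p.1 = i := by
  rw [PySem.List.pyGetD_of_nonneg routes [] hi] at hne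
  have hlt : i.toNat < routes.length := by
    by_contra hc
    exact hne (List.getD_eq_default routes [] (by omega))
  refine ⟨((i.toNat : Int), routes[i.toNat]), ?_, ?_⟩
  · rw [PySem.List.mem_enumerate_iff]
    exact ⟨i.toNat, hlt, by simp⟩
  · simp [Int.toNat_of_nonneg hi]

theorem pvEnumNe (routes : List (List Int)) :
    (PySem.List.enumerate routes 0).Pairwise (fun p q => p.1 ≠ q.1) :=
  (PySem.List.pairwise_lt_enumerate routes 0).imp (fun h => ne_of_lt h)

-- characterization of one sweep of B

theorem pvSweepFold_mem_S (prev : PySem.Set Int) (x : Int) :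
    ∀ (L : List (Int × List Int)), L.Pairwise (fun p q => p.1 ≠ q.1) →
    ∀ (X Y : PySem.Set Int),
      x ∈ (L.foldl (fun a p =>
            if p.1 ∉ a.2 ∧ p.2.any (fun s => PySem.Set.contains prev s) = true then
              (PySem.Set.update a.1 p.2, PySem.Set.add a.2 p.1)
            else a) (X, Y)).1
        ↔ x ∈ X ∨ ∃ p ∈ L, p.1 ∉ Y ∧ (∃ s ∈ p.2, s ∈ prev) ∧ x ∈ p.2 := by
  intro L
  induction L with
  | nil => intro _ X Y; simp
  | cons p0 tl ih =>
    intro hpw X Y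
    rw [List.pairwise_cons] at hpw
    rw [List.foldl_cons]
    have hany : (p0.2.any (fun s => PySem.Set.contains prev s) = true) ↔ ∃ s ∈ p0.2, s ∈ prev := by
      rw [List.any_eq_true]
      constructor
      · rintro ⟨s, hs, h⟩; exact ⟨s, hs, (PySem.Set.contains_iff prev s).mp h⟩
      · rintro ⟨s, hs, h⟩; exact ⟨s, hs, (PySem.Set.contains_iff prev s).mpr h⟩
    by_cases hc : p0.1 ∉ Y ∧ p0.2.any (fun s => PySem.Set.contains prev s) = true
    · rw [if_pos (show p0.1 ∉ ((X, Y) : PySem.Set Int × PySem.Set Int).2 ∧ _ from hc)]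
      rw [ih hpw.2]
      constructor
      · rintro (h | ⟨q, hq, hqY, hqt, hx⟩)
        · rcases (PySem.Set.mem_update _ _ _).mp h with h' | h'
          · exact Or.inl h'
          · exact Or.inr ⟨p0, List.mem_cons_self, hc.1, hany.mp hc.2, h'⟩
        · have hqY' : q.1 ∉ Y := fun hy => hqY ((PySem.Set.mem_add _ _ _).mpr (Or.inl hy))
          exact Or.inr ⟨q, List.mem_cons_of_mem _ hq, hqY', hqt, hx⟩
      · rintro (h | ⟨q, hq, hqY, hqt, hx⟩)
        · exact Or.inl ((PySem.Set.mem_update _ _ _).mpr (Or.inl h))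
        · rcases List.mem_cons.mp hq with e | e
          · subst e
            exact Or.inl ((PySem.Set.mem_update _ _ _).mpr (Or.inr hx))
          · have hne : q.1 ≠ p0.1 := fun h' => (hpw.1 q e) h'.symm
            have : q.1 ∉ PySem.Set.add Y p0.1 := by
              rw [PySem.Set.mem_add]
              rintro (h' | h')
              · exact hqY h'
              · exact hne h'
            exact Or.inr ⟨q, e, this, hqt, hx⟩
    · rw [if_neg hc]
      rw [ih hpw.2]
      constructor
      · rintro (h | ⟨q, hq, hqY, hqt, hx⟩)
        · exact Or.inl h
        · exact Or.inr ⟨q, List.mem_cons_of_mem _ hq, hqY, hqt, hx⟩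
      · rintro (h | ⟨q, hq, hqY, hqt, hx⟩)
        · exact Or.inl h
        · rcases List.mem_cons.mp hq with e | e
          · subst e
            exact absurd ⟨hqY, hany.mpr hqt⟩ hc
          · exact Or.inr ⟨q, e, hqY, hqt, hx⟩

theorem pvSweepFold_mem_U (prev : PySem.Set Int) (i : Int) :
    ∀ (L : List (Int × List Int)), L.Pairwise (fun p q => p.1 ≠ q.1) →
    ∀ (X Y : PySem.Set Int),
      i ∈ (L.foldl (fun a p =>
            if p.1 ∉ a.2 ∧ p.2.any (fun s => PySem.Set.contains prev s) = true then
              (PySem.Set.update a.1 p.2, PySem.Set.add a.2 p.1)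
            else a) (X, Y)).2
        ↔ i ∈ Y ∨ ∃ p ∈ L, p.1 = i ∧ p.1 ∉ Y ∧ (∃ s ∈ p.2, s ∈ prev) := by
  intro L
  induction L with
  | nil => intro _ X Y; simp
  | cons p0 tl ih =>
    intro hpw X Y
    rw [List.pairwise_cons] at hpw
    rw [List.foldl_cons]
    have hany : (p0.2.any (fun s => PySem.Set.contains prev s) = true) ↔ ∃ s ∈ p0.2, s ∈ prev := by
      rw [List.any_eq_true]
      constructor
      · rintro ⟨s, hs, h⟩; exact ⟨s, hs, (PySem.Set.contains_iff prev s).mp h⟩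
      · rintro ⟨s, hs, h⟩; exact ⟨s, hs, (PySem.Set.contains_iff prev s).mpr h⟩
    by_cases hc : p0.1 ∉ Y ∧ p0.2.any (fun s => PySem.Set.contains prev s) = true
    · rw [if_pos (show p0.1 ∉ ((X, Y) : PySem.Set Int × PySem.Set Int).2 ∧ _ from hc)]
      rw [ih hpw.2]
      constructor
      · rintro (h | ⟨q, hq, hqi, hqY, hqt⟩)
        · rcases (PySem.Set.mem_add _ _ _).mp h with h' | h'
          · exact Or.inl h'
          · exact Or.inr ⟨p0, List.mem_cons_self, h'.symm, hc.1, hany.mp hc.2⟩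
        · have hqY' : q.1 ∉ Y := fun hy => hqY ((PySem.Set.mem_add _ _ _).mpr (Or.inl hy))
          exact Or.inr ⟨q, List.mem_cons_of_mem _ hq, hqi, hqY', hqt⟩
      · rintro (h | ⟨q, hq, hqi, hqY, hqt⟩)
        · exact Or.inl ((PySem.Set.mem_add _ _ _).mpr (Or.inl h))
        · rcases List.mem_cons.mp hq with e | e
          · subst e
            exact Or.inl ((PySem.Set.mem_add _ _ _).mpr (Or.inr hqi.symm))
          · have hne : q.1 ≠ p0.1 := fun h' => (hpw.1 q e) h'.symm
            have : q.1 ∉ PySem.Set.add Y p0.1 := by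
              rw [PySem.Set.mem_add]
              rintro (h' | h')
              · exact hqY h'
              · exact hne h'
            exact Or.inr ⟨q, e, hqi, this, hqt⟩
    · rw [if_neg hc]
      rw [ih hpw.2]
      constructor
      · rintro (h | ⟨q, hq, hqi, hqY, hqt⟩)
        · exact Or.inl h
        · exact Or.inr ⟨q, List.mem_cons_of_mem _ hq, hqi, hqY, hqt⟩
      · rintro (h | ⟨q, hq, hqi, hqY, hqt⟩)
        · exact Or.inl h
        · rcases List.mem_cons.mp hq with e | e
          · subst e
            exact absurd ⟨hqY, hany.mpr hqt⟩ hc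
          · exact Or.inr ⟨q, e, hqi, hqY, hqt⟩

theorem pvSweep_mem_S (routes : List (List Int)) (R V : PySem.Set Int) (x : Int) :
    x ∈ (pvSweep routes R (R, V)).1
      ↔ x ∈ R ∨ ∃ p ∈ PySem.List.enumerate routes 0,
          p.1 ∉ V ∧ (∃ s ∈ p.2, s ∈ R) ∧ x ∈ p.2 := by
  unfold pvSweep
  exact pvSweepFold_mem_S R x _ (pvEnumNe routes) R V

theorem pvSweep_mem_U (routes : List (List Int)) (R V : PySem.Set Int) (i : Int) :
    i ∈ (pvSweep routes R (R, V)).2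
      ↔ i ∈ V ∨ ∃ p ∈ PySem.List.enumerate routes 0,
          p.1 = i ∧ p.1 ∉ V ∧ (∃ s ∈ p.2, s ∈ R) := by
  unfold pvSweep
  exact pvSweepFold_mem_U R i _ (pvEnumNe routes) R V

-- the sweep only appends to the reached set, and keeps it duplicate-free

theorem pvUpdate_ext (xs : List Int) :
    ∀ (s : PySem.Set Int), ∃ e, PySem.Set.update s xs = s ++ e := by
  induction xs with
  | nil => intro s; exact ⟨[], by simp [PySem.Set.update]⟩
  | cons x tl ih =>
    intro s
    rw [PySem.Set.update_cons]
    by_cases h : x ∈ s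
    · rw [PySem.Set.add_eq_ite, if_pos h]
      exact ih s
    · rw [PySem.Set.add_eq_ite, if_neg h]
      obtain ⟨e, he⟩ := ih (s ++ [x])
      exact ⟨[x] ++ e, by rw [he, List.append_assoc]⟩

theorem pvSweepFold_ext (prev : PySem.Set Int) :
    ∀ (L : List (Int × List Int)) (X Y : PySem.Set Int),
      ∃ e, (L.foldl (fun a p =>
            if p.1 ∉ a.2 ∧ p.2.any (fun s => PySem.Set.contains prev s) = true then
              (PySem.Set.update a.1 p.2, PySem.Set.add a.2 p.1)
            else a) (X, Y)).1 = X ++ e := by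
  intro L
  induction L with
  | nil => intro X Y; exact ⟨[], by simp⟩
  | cons p0 tl ih =>
    intro X Y
    rw [List.foldl_cons]
    by_cases hc : p0.1 ∉ Y ∧ p0.2.any (fun s => PySem.Set.contains prev s) = true
    · rw [if_pos (show p0.1 ∉ ((X, Y) : PySem.Set Int × PySem.Set Int).2 ∧ _ from hc)]
      obtain ⟨e1, he1⟩ := pvUpdate_ext p0.2 X
      obtain ⟨e2, he2⟩ := ih (PySem.Set.update X p0.2) (PySem.Set.add Y p0.1)
      exact ⟨e1 ++ e2, by rw [he2, he1, List.append_assoc]⟩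
    · rw [if_neg hc]
      exact ih X Y

theorem pvSweepFold_nodup (prev : PySem.Set Int) :
    ∀ (L : List (Int × List Int)) (X Y : PySem.Set Int), X.Nodup →
      (L.foldl (fun a p =>
            if p.1 ∉ a.2 ∧ p.2.any (fun s => PySem.Set.contains prev s) = true then
              (PySem.Set.update a.1 p.2, PySem.Set.add a.2 p.1)
            else a) (X, Y)).1.Nodup := by
  intro L
  induction L with
  | nil => intro X Y h; simpa using h
  | cons p0 tl ih =>
    intro X Y h
    rw [List.foldl_cons]
    by_cases hc : p0.1 ∉ Y ∧ p0.2.any (fun s => PySem.Set.contains prev s) = true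
    · rw [if_pos (show p0.1 ∉ ((X, Y) : PySem.Set Int × PySem.Set Int).2 ∧ _ from hc)]
      exact ih _ _ (PySem.Set.nodup_update X p0.2 h)
    · rw [if_neg hc]
      exact ih X Y h

theorem pvSweep_ext (routes : List (List Int)) (R V : PySem.Set Int) :
    ∃ e, (pvSweep routes R (R, V)).1 = R ++ e := by
  unfold pvSweep
  exact pvSweepFold_ext R _ R V

theorem pvSweep_nodup (routes : List (List Int)) (R V : PySem.Set Int) (h : R.Nodup) :
    (pvSweep routes R (R, V)).1.Nodup := by
  unfold pvSweep
  exact pvSweepFold_nodup R _ R V h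

-- a station outside S that occurs in some route keeps pvFree positive

theorem pvFree_pos (routes : List (List Int)) (S : PySem.Set Int) (x : Int)
    (hx : x ∈ routes.flatten) (hS : x ∉ S) : 1 ≤ pvFree routes S := by
  unfold pvFree
  have : x ∈ routes.flatten.dedup.filter (fun y => decide (y ∉ S)) :=
    List.mem_filter.mpr ⟨List.mem_dedup.mpr hx, by simp [hS]⟩
  exact List.length_pos_of_mem this

theorem pvFree_congr (routes : List (List Int)) (S R : PySem.Set Int)
    (h : ∀ x, x ∈ S ↔ x ∈ R) : pvFree routes S = pvFree routes R := by
  unfold pvFree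
  have : ∀ y ∈ routes.flatten.dedup, (decide (y ∉ S)) = (decide (y ∉ R)) := by
    intro y _
    by_cases hy : y ∈ R
    · simp [hy, (h y).mpr hy]
    · have h2 : y ∉ S := fun hc => hy ((h y).mp hc)
      simp [hy, h2]
  rw [List.filter_congr this]

-- the bridge: an enumerate entry fires in B's sweep iff its route is an unvisited route
-- through a frontier station of the level loop

theorem pvBridge (routes : List (List Int)) (S R U V : PySem.Set Int) (fr : List Int)
    (hSR : ∀ x, x ∈ S ↔ x ∈ R) (hUV : ∀ i, i ∈ U ↔ i ∈ V)
    (hfr : ∀ x ∈ fr, x ∈ S)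
    (inv1 : ∀ i : Int, 0 ≤ i → (∃ s ∈ PySem.List.pyGetD routes i [], s ∈ S ∧ s ∉ fr) → i ∈ U)
    (p : Int × List Int) (hp : p ∈ PySem.List.enumerate routes 0) :
    (p.1 ∉ V ∧ ∃ s ∈ p.2, s ∈ R) ↔ (p.1 ∉ U ∧ ∃ st ∈ fr, p.1 ∈ (pvAdjB routes).getD st []) := by
  obtain ⟨hp0, hpget⟩ := pvEnumGet routes p hp
  constructor
  · rintro ⟨hV, s, hs, hsR⟩
    have hU : p.1 ∉ U := fun h => hV ((hUV p.1).mp h)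
    have hsS : s ∈ S := (hSR s).mpr hsR
    have hsfr : s ∈ fr := by
      by_contra hc
      exact hU (inv1 p.1 hp0 ⟨s, by rw [hpget]; exact hs, hsS, hc⟩)
    refine ⟨hU, s, hsfr, ?_⟩
    exact (pvAdjB_mem routes s p.1).mpr ⟨p, hp, rfl, hs⟩
  · rintro ⟨hU, st, hst, hadj⟩
    obtain ⟨q, hq, hq1, hq2⟩ := (pvAdjB_mem routes st p.1).mp hadj
    have hqp : q = p := pvEnumUnique routes q p hq hp hq1
    exact ⟨fun h => hU ((hUV p.1).mpr h), st, by rw [← hqp]; exact hq2,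
      (hSR st).mp (hfr st hst)⟩

-- one level of the loop = one sweep of B (reached sets, then visited-route sets)

theorem pvLevel_S (routes : List (List Int)) (S R U V : PySem.Set Int) (fr : List Int)
    (hSR : ∀ x, x ∈ S ↔ x ∈ R) (hUV : ∀ i, i ∈ U ↔ i ∈ V)
    (hfr : ∀ x ∈ fr, x ∈ S)
    (inv1 : ∀ i : Int, 0 ≤ i → (∃ s ∈ PySem.List.pyGetD routes i [], s ∈ S ∧ s ∉ fr) → i ∈ U) :
    ∀ x, x ∈ (pvExpandB routes (pvAdjB routes) fr ([], S, U)).2.1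
      ↔ x ∈ (pvSweep routes R (R, V)).1 := by
  intro x
  rw [pvSweep_mem_S]
  rw [pvExpandB_mem_S]
  constructor
  · rintro (h | ⟨rid, hrU, ⟨st, hst, hadj⟩, hx⟩)
    · exact Or.inl ((hSR x).mp h)
    · obtain ⟨p, hp, hp1, hp2⟩ := (pvAdjB_mem routes st rid).mp hadj
      obtain ⟨hp0, hpget⟩ := pvEnumGet routes p hp
      have hB := (pvBridge routes S R U V fr hSR hUV hfr inv1 p hp).mpr
        ⟨by rw [hp1]; exact hrU, st, hst, by rw [hp1]; exact hadj⟩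
      exact Or.inr ⟨p, hp, hB.1, hB.2, by rw [← hpget, hp1]; exact hx⟩
  · rintro (h | ⟨p, hp, hpV, hpt, hx⟩)
    · exact Or.inl ((hSR x).mpr h)
    · obtain ⟨hU, st, hst, hadj⟩ :=
        (pvBridge routes S R U V fr hSR hUV hfr inv1 p hp).mp ⟨hpV, hpt⟩
      obtain ⟨hp0, hpget⟩ := pvEnumGet routes p hp
      exact Or.inr ⟨p.1, hU, ⟨st, hst, hadj⟩, by rw [hpget]; exact hx⟩

theorem pvLevel_U (routes : List (List Int)) (S R U V : PySem.Set Int) (fr : List Int)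
    (hSR : ∀ x, x ∈ S ↔ x ∈ R) (hUV : ∀ i, i ∈ U ↔ i ∈ V)
    (hfr : ∀ x ∈ fr, x ∈ S)
    (inv1 : ∀ i : Int, 0 ≤ i → (∃ s ∈ PySem.List.pyGetD routes i [], s ∈ S ∧ s ∉ fr) → i ∈ U) :
    ∀ i, i ∈ (pvExpandB routes (pvAdjB routes) fr ([], S, U)).2.2
      ↔ i ∈ (pvSweep routes R (R, V)).2 := by
  intro i
  rw [pvSweep_mem_U]
  rw [pvExpandB_mem_U]
  constructor
  · rintro (h | ⟨st, hst, hadj⟩)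
    · exact Or.inl ((hUV i).mp h)
    · by_cases hU : i ∈ U
      · exact Or.inl ((hUV i).mp hU)
      · obtain ⟨p, hp, hp1, hp2⟩ := (pvAdjB_mem routes st i).mp hadj
        have hB := (pvBridge routes S R U V fr hSR hUV hfr inv1 p hp).mpr
          ⟨by rw [hp1]; exact hU, st, hst, by rw [hp1]; exact hadj⟩
        exact Or.inr ⟨p, hp, hp1, hB.1, hB.2⟩
  · rintro (h | ⟨p, hp, hpi, hpV, hpt⟩)
    · exact Or.inl ((hUV i).mpr h)
    · obtain ⟨hU, st, hst, hadj⟩ :=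
        (pvBridge routes S R U V fr hSR hUV hfr inv1 p hp).mp ⟨hpV, hpt⟩
      exact Or.inr ⟨st, hst, by rw [← hpi]; exact hadj⟩

-- the level loop equals B's saturation loop

theorem pvLoop_eq_sat (routes : List (List Int)) (t : Int) :
    ∀ (N : Nat) (S : PySem.Set Int) (fr : List Int) (U R V : PySem.Set Int) (k : Int)
      (fuel : Nat),
      pvFree routes S ≤ N → R.Nodup →
      (∀ x, x ∈ S ↔ x ∈ R) → (∀ i, i ∈ U ↔ i ∈ V) →
      (∀ x ∈ fr, x ∈ S) → t ∉ S →
      (∀ i : Int, 0 ≤ i → (∃ s ∈ PySem.List.pyGetD routes i [], s ∈ S ∧ s ∉ fr) → i ∈ U) →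
      (∀ i ∈ U, ∀ s ∈ PySem.List.pyGetD routes i [], s ∈ S) →
      pvFree routes S + 1 ≤ fuel →
      pvLoopB routes (pvAdjB routes) t fuel S fr U k = pvSatLoop routes t fuel R V k := by
  intro N
  induction N using Nat.strong_induction_on with
  | _ N ih =>
    intro S fr U R V k fuel hN hRnd hSR hUV hfr htS inv1 inv2 hfuel
    rcases fuel with _ | fuel
    · omega
    rw [pvLoopB, if_neg htS]
    rw [pvSatLoop]
    dsimp only
    set E := pvExpandB routes (pvAdjB routes) fr (([] : List Int), S, U) with hE
    set W := pvSweep routes R (R, V) with hW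
    have hSmem : ∀ x, x ∈ E.2.1 ↔ x ∈ W.1 :=
      pvLevel_S routes S R U V fr hSR hUV hfr inv1
    have hUmem : ∀ i, i ∈ E.2.2 ↔ i ∈ W.2 :=
      pvLevel_U routes S R U V fr hSR hUV hfr inv1
    obtain ⟨⟨new, hnew⟩, s1, u1, f1, g1, m1⟩ := pvExpandB_inv routes (pvAdjB routes) fr (([] : List Int), S, U)
    simp only [← hE] at s1 u1 f1 g1 m1
    obtain ⟨ext, hext⟩ := pvSweep_ext routes R V
    have hWnd : W.1.Nodup := pvSweep_nodup routes R V hRnd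
    by_cases ht2 : t ∈ E.2.1
    · -- target reached this level, on both sides
      have htW : t ∈ W.1 := (hSmem t).mp ht2
      have htE1 : t ∈ E.1 := by
        rcases g1 t ht2 with h | h
        · exact absurd h htS
        · exact h
      have hE1ne : E.1 ≠ [] := List.ne_nil_of_mem htE1
      rw [if_neg hE1ne, if_pos htW]
      have htfl : t ∈ routes.flatten := by
        rcases f1 t htE1 with h | ⟨_, _, h⟩
        · cases h
        · exact h
      have hfp : 1 ≤ pvFree routes S := pvFree_pos routes S t htfl htS
      rcases fuel with _ | fuel2
      · omega
      rw [pvLoopB, if_pos ht2]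
    · have htW : t ∉ W.1 := fun h => ht2 ((hSmem t).mpr h)
      rw [if_neg htW]
      by_cases h1 : E.1 = []
      · -- no growth: both return -1
        rw [if_pos h1]
        have hsub : ∀ x ∈ W.1, x ∈ R := by
          intro x hx
          have hxE : x ∈ E.2.1 := (hSmem x).mpr hx
          rcases g1 x hxE with h | h
          · exact (hSR x).mp h
          · rw [h1] at h; cases h
        have hext0 : ext = [] := by
          rcases ext with _ | ⟨y, ys⟩
          · rfl
          · exfalso
            have hyW : y ∈ W.1 := by rw [hext]; exact List.mem_append_right _ List.mem_cons_self
            have hyR : y ∈ R := hsub y hyW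
            rw [hext] at hWnd
            exact (List.nodup_append.mp hWnd).2.2 y hyR y List.mem_cons_self rfl
        rw [if_pos (by rw [hext, hext0]; simp)]
      · -- growth: recurse
        rw [if_neg h1]
        have hlen : ¬ W.1.length = R.length := by
          intro hlc
          have hext0 : ext = [] := by
            have := congrArg List.length hext
            rw [hlc] at this
            simp at this
            exact this
          apply h1
          rw [List.eq_nil_iff_forall_not_mem]
          intro x hx
          rcases f1 x hx with h | ⟨hxE, hxS, _⟩
          · cases h
          · have hxW : x ∈ W.1 := (hSmem x).mp hxE
            rw [hext, hext0, List.append_nil] at hxW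
            exact hxS ((hSR x).mpr hxW)
        rw [if_neg hlen]
        -- strict decrease
        obtain ⟨x, hxE1⟩ : ∃ x, x ∈ E.1 := by
          rcases e : E.1 with _ | ⟨x, tl⟩
          · exact absurd e h1
          · exact ⟨x, List.mem_cons_self⟩
        rcases f1 x hxE1 with h0 | ⟨hxE, hxS, hxfl⟩
        · cases h0
        have hlt : pvFree routes E.2.1 < pvFree routes S :=
          pvFree_lt routes S E.2.1 x s1 hxfl hxS hxE
        -- invariants for the next level
        have hfr' : ∀ y ∈ E.1, y ∈ E.2.1 := by
          intro y hy
          rcases f1 y hy with h | ⟨h, _, _⟩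
          · cases h
          · exact h
        have inv1' : ∀ i : Int, 0 ≤ i →
            (∃ s ∈ PySem.List.pyGetD routes i [], s ∈ E.2.1 ∧ s ∉ E.1) → i ∈ E.2.2 := by
          rintro i hi ⟨s, hs, hsE, hsnE⟩
          have hsS : s ∈ S := by
            rcases g1 s hsE with h | h
            · exact h
            · exact absurd h hsnE
          by_cases hsfr : s ∈ fr
          · obtain ⟨p, hp, hp1⟩ := pvEnumOf routes i hi (List.ne_nil_of_mem hs)
            have hadj : i ∈ (pvAdjB routes).getD s [] := by
              obtain ⟨_, hpget⟩ := pvEnumGet routes p hp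
              exact (pvAdjB_mem routes s i).mpr ⟨p, hp, hp1, by rw [← hpget, hp1]; exact hs⟩
            exact (pvExpandB_mem_U routes (pvAdjB routes) i fr _).mpr (Or.inr ⟨s, hsfr, hadj⟩)
          · exact u1 i (inv1 i hi ⟨s, hs, hsS, hsfr⟩)
        have inv2' : ∀ i ∈ E.2.2, ∀ s ∈ PySem.List.pyGetD routes i [], s ∈ E.2.1 := by
          intro i hiE s hs
          rcases (pvExpandB_mem_U routes (pvAdjB routes) i fr _).mp hiE with hU | ⟨st, hst, hadj⟩
          · exact s1 s (inv2 i hU s hs)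
          · by_cases hU : i ∈ U
            · exact s1 s (inv2 i hU s hs)
            · exact (pvExpandB_mem_S routes (pvAdjB routes) s fr _).mpr
                (Or.inr ⟨i, hU, ⟨st, hst, hadj⟩, hs⟩)
        have hfree' : pvFree routes W.1 = pvFree routes E.2.1 :=
          pvFree_congr routes W.1 E.2.1 (fun y => (hSmem y).symm)
        exact ih (pvFree routes E.2.1) (by omega) E.2.1 E.1 E.2.2 W.1 W.2 (k + 1) fuel
          (le_refl _) hWnd hSmem hUmem hfr' ht2 inv1' inv2' (by omega)

-- the level loop started at a singleton = B's min_buses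

theorem pvTopSat (routes : List (List Int)) (s t : Int) :
    pvLoopB routes (pvAdjB routes) t (pvFree routes (PySem.Set.ofList [s]) + 1)
        (PySem.Set.ofList [s]) [s] [] 0
      = pvMinBuses routes s t := by
  have hof : PySem.Set.ofList [s] = [s] := rfl
  unfold pvMinBuses
  by_cases hts : s = t
  · subst hts
    rw [if_pos rfl, pvLoopB, if_pos (by rw [hof]; exact List.mem_cons_self)]
  · rw [if_neg hts]
    apply pvLoop_eq_sat routes t (pvFree routes (PySem.Set.ofList [s]))
    · exact le_refl _
    · rw [hof]; exact List.nodup_singleton s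
    · intro x; exact Iff.rfl
    · intro i; exact Iff.rfl
    · intro x hx; rw [hof]; exact hx
    · rw [hof]
      simp only [List.mem_singleton]
      exact fun h => hts h.symm
    · rintro i _ ⟨s', _, hs'S, hs'fr⟩
      exact absurd (by rw [hof] at hs'S; exact hs'S) hs'fr
    · rintro i hi
      cases hi
    · exact le_refl _

-- ===== VERDICT (by name: the statement is the Claim_ definition above) =====
theorem find_min_bus_routes_spec : Claim_equal_find_min_bus_routes := by
  intro start breakfast end_ routes _
  unfold Spec_find_min_bus_routes
  simp only [find_min_bus_routes, find_min_bus_routes_alt, pvTop, pvTopSat]
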